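-- pv_equiv track=rewrite | github.com/adampy/aoc-2024 | day6/app.py | get_start_pos_and_orientation
-- ===== SOURCE A (Python) =====
-- class Orientation:
--     UP = "^"
--     RIGHT = ">"
--     DOWN = "v"
--     LEFT = "<"
--
-- def get_start_pos_and_orientation(lines):
--     x_pos = 0
--     y_pos = 0
--     orientation = None
--     for y, line in enumerate(lines):
--         for x, c in enumerate(line):
--             if c in [Orientation.UP, Orientation.RIGHT, Orientation.DOWN, Orientation.LEFT]:
--                 x_pos = x
--                 y_pos = y
--                 orientation = c
--     return x_pos, y_pos, orientation
-- ===== SOURCE B (Python) =====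
-- def get_start_pos_and_orientation(lines):
--     for y, line in reversed(list(enumerate(lines))):
--         for x, c in reversed(list(enumerate(line))):
--             if c in ("^", ">", "v", "<"):
--                 return x, y, c
--     return 0, 0, None
-- ===== Notes on version B (the rewrite author's own statement) =====
-- stated objective: simpler
-- what changed: Replaces A's full forward scan with an overwriting accumulator by a stateless reverse nested scan that returns the first glyph found (= A's last match in reading order), with an early exit.
import Mathlib
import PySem

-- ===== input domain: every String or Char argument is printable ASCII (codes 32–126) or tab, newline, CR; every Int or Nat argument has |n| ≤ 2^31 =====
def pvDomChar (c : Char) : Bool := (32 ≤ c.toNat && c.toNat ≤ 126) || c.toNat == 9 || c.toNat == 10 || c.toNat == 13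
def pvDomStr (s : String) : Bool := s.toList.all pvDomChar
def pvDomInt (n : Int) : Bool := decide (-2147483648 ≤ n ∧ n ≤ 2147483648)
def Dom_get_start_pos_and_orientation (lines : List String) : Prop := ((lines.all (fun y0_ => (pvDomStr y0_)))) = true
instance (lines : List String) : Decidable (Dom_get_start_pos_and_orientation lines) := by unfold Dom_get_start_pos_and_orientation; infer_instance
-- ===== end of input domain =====

-- B replaces A's full forward scan with an overwriting accumulator by a stateless
-- reverse nested scan with early exit (objective: simpler).


-- the four orientation glyphs "^" ">" "v" "<" (as the characters of the one-char strings)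
def pvGlyphs : List Char := ['^', '>', 'v', '<']

-- ===== PORT A =====
-- A: forward nested fold carrying (x_pos, y_pos, orientation), overwritten on every match
def get_start_pos_and_orientation (lines : List String) : Int × Int × Option String :=
  (PySem.List.enumerate lines).foldl
    (fun s (p : Int × String) =>
      (PySem.List.enumerate p.2.toList).foldl
        (fun s' (q : Int × Char) =>
          if q.2 ∈ pvGlyphs then (q.1, p.1, some q.2.toString) else s')
        s)
    (0, 0, none)

-- ===== PORT B =====
-- B's inner loop: scan the reversed enumerated characters of one line, early return = some
def pvAltLine (y : Int) : List (Int × Char) → Option (Int × Int × Option String)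
  | [] => none
  | q :: rest => if q.2 ∈ pvGlyphs then some (q.1, y, some q.2.toString) else pvAltLine y rest

-- B's outer loop: scan the reversed enumerated lines
def pvAltScan : List (Int × String) → Option (Int × Int × Option String)
  | [] => none
  | p :: rest =>
    match pvAltLine p.1 (PySem.List.enumerate p.2.toList).reverse with
    | some r => some r
    | none => pvAltScan rest

def get_start_pos_and_orientation_alt (lines : List String) : Int × Int × Option String :=
  match pvAltScan (PySem.List.enumerate lines).reverse with
  | some r => r
  | none => (0, 0, none)

-- ===== PRECONDITION & SPEC =====
def Spec_get_start_pos_and_orientation (lines : List String) (out : Int × Int × Option String) : Prop := out = get_start_pos_and_orientation_alt lines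
instance (lines : List String) (out : Int × Int × Option String) : Decidable (Spec_get_start_pos_and_orientation lines out) := by unfold Spec_get_start_pos_and_orientation; infer_instance

-- ===== CLAIM (what is proved, stated in full; the proofs are below) =====
def Claim_equal_get_start_pos_and_orientation : Prop := ∀ (lines : List String), Dom_get_start_pos_and_orientation lines → Spec_get_start_pos_and_orientation lines (get_start_pos_and_orientation lines)

-- ===== LEMMAS AND PROOFS =====

-- A's inner fold over a line = B's reverse scan of that line, with the incoming state as default
theorem pvInner_eq (y : Int) (items : List (Int × Char)) (s : Int × Int × Option String) :
    items.foldl (fun s' (q : Int × Char) =>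
        if q.2 ∈ pvGlyphs then (q.1, y, some q.2.toString) else s') s
      = (pvAltLine y items.reverse).getD s := by
  induction items using List.reverseRecOn with
  | nil => simp [pvAltLine]
  | append_singleton xs q ih =>
      simp only [List.foldl_append, List.foldl_cons, List.foldl_nil, List.reverse_append,
        List.reverse_cons, List.reverse_nil, List.nil_append, List.cons_append, pvAltLine]
      by_cases h : q.2 ∈ pvGlyphs
      · simp [h]
      · simpa [h] using ih

-- A's outer fold = B's reverse scan of the enumerated lines, with the initial state as default
theorem pvOuter_eq (ls : List (Int × String)) (s : Int × Int × Option String) :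
    ls.foldl (fun s (p : Int × String) =>
        (PySem.List.enumerate p.2.toList).foldl
          (fun s' (q : Int × Char) =>
            if q.2 ∈ pvGlyphs then (q.1, p.1, some q.2.toString) else s')
          s) s
      = (pvAltScan ls.reverse).getD s := by
  induction ls using List.reverseRecOn with
  | nil => simp [pvAltScan]
  | append_singleton xs p ih =>
      simp only [List.foldl_append, List.foldl_cons, List.foldl_nil, List.reverse_append,
        List.reverse_cons, List.reverse_nil, List.nil_append, List.cons_append, pvAltScan]
      rw [pvInner_eq p.1 _ _]
      cases h : pvAltLine p.1 (PySem.List.enumerate p.2.toList).reverse with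
      | none => simp only [h]; simpa using ih
      | some r => simp

-- ===== VERDICT (by name: the statement is the Claim_ definition above) =====
theorem get_start_pos_and_orientation_spec : Claim_equal_get_start_pos_and_orientation := by
  intro lines _
  unfold Spec_get_start_pos_and_orientation get_start_pos_and_orientation
    get_start_pos_and_orientation_alt
  rw [pvOuter_eq]
  cases pvAltScan (PySem.List.enumerate lines).reverse <;> simp
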